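-- pv_equiv track=rewrite | github.com/sphinx-contrib/lua-ls | sphinx_lua_ls/utils.py | separate_paren_prefix
-- ===== SOURCE A (Python) =====
-- def separate_paren_prefix(
--     sig: str, parens: tuple[str, str] = ("(", ")")
-- ) -> tuple[str, str]:
--     """
--     If string starts with a brace sequence, separate it out from the string.
--
--     """
--
--     if not sig.startswith(parens[0]):
--         return "", sig.strip()
--     else:
--         sig = sig[1:]
--
--     depth = 0
--     in_str = False
--     str_c = ""
--     esc = False
--     for i, c in enumerate(sig):
--         if in_str:
--             if esc:
--                 esc = False
--             elif c == str_c: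
--                 in_str = False
--             elif c == "\\":
--                 esc = True
--         elif c in "([{<":
--             depth += 1
--         elif depth == 0 and c == parens[1]:
--             return sig[:i].strip(), sig[i + 1 :].strip()
--         elif c in ")]}>":
--             depth = max(depth - 1, 0)
--         elif c in "'\"`":
--             in_str = True
--             str_c = c
--
--     return sig.strip(), ""
-- ===== SOURCE B (Python) =====
-- def separate_paren_prefix(
--     sig: str, parens: tuple[str, str] = ("(", ")")
-- ) -> tuple[str, str]:
--     """
--     If string starts with a brace sequence, separate it out from the string.
--
--     Index-based scan: a single `depth` counter; string literals are skipped
--     by a dedicated inner loop instead of in_str/str_c/esc flags.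
--     """
--
--     if not sig.startswith(parens[0]):
--         return "", sig.strip()
--     sig = sig[1:]
--
--     n = len(sig)
--     depth = 0
--     i = 0
--     while i < n:
--         c = sig[i]
--         if c in "([{<":
--             depth += 1
--         elif depth == 0 and c == parens[1]:
--             return sig[:i].strip(), sig[i + 1 :].strip()
--         elif c in ")]}>":
--             depth = max(depth - 1, 0)
--         elif c in "'\"`":
--             # skip the quoted literal: land on the closing quote (or run out)
--             i += 1
--             while i < n:
--                 if sig[i] == "\\":
--                     i += 2
--                 elif sig[i] == c:
--                     break
--                 else:
--                     i += 1
--         i += 1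
--
--     return sig.strip(), ""
-- ===== Notes on version B (the rewrite author's own statement) =====
-- stated objective: alternative
-- what changed: Replaced the in_str/str_c/esc flag machine of the single for-loop by an index-based while loop that keeps only `depth` and skips quoted literals with a dedicated inner loop (advancing by 2 over backslash escapes).
import Mathlib
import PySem

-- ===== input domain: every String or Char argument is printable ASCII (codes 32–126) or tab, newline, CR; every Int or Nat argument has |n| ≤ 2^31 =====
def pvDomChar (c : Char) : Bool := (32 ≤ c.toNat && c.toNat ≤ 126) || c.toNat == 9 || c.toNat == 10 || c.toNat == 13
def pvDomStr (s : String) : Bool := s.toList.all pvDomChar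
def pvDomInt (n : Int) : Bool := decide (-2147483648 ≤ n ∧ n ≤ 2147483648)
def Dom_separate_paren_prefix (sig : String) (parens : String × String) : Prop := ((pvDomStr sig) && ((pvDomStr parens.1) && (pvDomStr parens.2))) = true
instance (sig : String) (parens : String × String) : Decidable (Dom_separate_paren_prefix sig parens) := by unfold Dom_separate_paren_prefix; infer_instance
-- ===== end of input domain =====

-- B replaces A's in_str/str_c/esc flag machine by an index-based loop keeping
-- only `depth`, with an inner loop that skips quoted literals; same O(n) cost.

-- ===== PORT A =====
-- A's for-loop over `enumerate(sig)`: structural recursion on the remaining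
-- characters `l` (= sig.drop i), carrying i, depth, in_str, str_c, esc.
def sppALoop (s : List Char) (p2 : String) (i : Nat) (l : List Char) (depth : Nat)
    (inStr : Bool) (strC : Char) (esc : Bool) : String × String :=
  match l with
  | [] => (PySem.Str.strip (String.mk s), "")
  | c :: rest =>
    if inStr then
      if esc then sppALoop s p2 (i+1) rest depth inStr strC false
      else if c == strC then sppALoop s p2 (i+1) rest depth false strC esc
      else if c == '\\' then sppALoop s p2 (i+1) rest depth inStr strC true
      else sppALoop s p2 (i+1) rest depth inStr strC esc
    else if "([{<".toList.contains c then sppALoop s p2 (i+1) rest (depth+1) inStr strC esc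
    else if depth == 0 && String.mk [c] == p2 then
      (PySem.Str.strip (String.mk (s.take i)), PySem.Str.strip (String.mk (s.drop (i+1))))
    -- max(depth-1, 0) is Nat truncated subtraction
    else if ")]}>".toList.contains c then sppALoop s p2 (i+1) rest (depth-1) inStr strC esc
    else if "'\"`".toList.contains c then sppALoop s p2 (i+1) rest depth true c esc
    else sppALoop s p2 (i+1) rest depth inStr strC esc

def separate_paren_prefix (sig : String) (parens : String × String) : String × String :=
  if !(PySem.Str.startswith sig parens.1) then ("", PySem.Str.strip sig)
  else
    -- sig = sig[1:]; str_c = "" never compares equal to a char, so the initial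
    -- strC is dead state (in_str starts False); ' ' is an arbitrary placeholder
    let s := sig.toList.drop 1
    sppALoop s parens.2 0 s 0 false ' ' false

-- ===== PORT B =====
-- the inner while loop: advance past a quoted literal, returning the index of
-- the closing quote (or any index ≥ n when the literal is unterminated)
def sppBSkip (s : List Char) (n : Nat) (c : Char) (i : Nat) : Nat :=
  if _h : i < n then
    if s.getD i ' ' == '\\' then sppBSkip s n c (i+2)
    else if s.getD i ' ' == c then i
    else sppBSkip s n c (i+1)
  else i
termination_by n - i

lemma sppBSkip_ge (s : List Char) (n : Nat) (c : Char) (i : Nat) : i ≤ sppBSkip s n c i := by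
  fun_induction sppBSkip s n c i with
  | case1 i h hb ih => omega
  | case2 i h hb hc => omega
  | case3 i h hb hc ih => omega
  | case4 i h => omega

-- the outer while loop: only i and depth
def sppBMain (s : List Char) (p2 : String) (n : Nat) (i : Nat) (depth : Nat) : String × String :=
  if _h : i < n then
    if "([{<".toList.contains (s.getD i ' ') then sppBMain s p2 n (i+1) (depth+1)
    else if depth == 0 && String.mk [s.getD i ' '] == p2 then
      (PySem.Str.strip (String.mk (s.take i)), PySem.Str.strip (String.mk (s.drop (i+1))))
    else if ")]}>".toList.contains (s.getD i ' ') then sppBMain s p2 n (i+1) (depth-1)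
    else if "'\"`".toList.contains (s.getD i ' ') then
      sppBMain s p2 n (sppBSkip s n (s.getD i ' ') (i+1) + 1) depth
    else sppBMain s p2 n (i+1) depth
  else (PySem.Str.strip (String.mk s), "")
termination_by n - i
decreasing_by
  · omega
  · omega
  · have := sppBSkip_ge s n (s.getD i ' ') (i+1); omega
  · omega

def separate_paren_prefix_alt (sig : String) (parens : String × String) : String × String :=
  if !(PySem.Str.startswith sig parens.1) then ("", PySem.Str.strip sig)
  else
    let s := sig.toList.drop 1
    sppBMain s parens.2 s.length 0 0

-- ===== PRECONDITION & SPEC =====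
def Spec_separate_paren_prefix (sig : String) (parens : String × String) (out : String × String) : Prop := out = separate_paren_prefix_alt sig parens
instance (sig : String) (parens : String × String) (out : String × String) : Decidable (Spec_separate_paren_prefix sig parens out) := by unfold Spec_separate_paren_prefix; infer_instance

-- ===== CLAIM (what is proved, stated in full; the proofs are below) =====
def Claim_equal_separate_paren_prefix : Prop := ∀ (sig : String) (parens : String × String), Dom_separate_paren_prefix sig parens → Spec_separate_paren_prefix sig parens (separate_paren_prefix sig parens)

-- ===== LEMMAS AND PROOFS =====

-- State correspondence, by strong induction on the remaining length:
--  * A in normal mode at i  ≡  B's outer loop at i;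
--  * A in-string (str_c = c, esc = false) at i  ≡  B resuming after sppBSkip from i;
--  * A in-string with esc = true at i  ≡  B resuming after sppBSkip from i+1.
lemma spp_corr (s : List Char) (p2 : String) :
    ∀ k i depth (sC : Char) (c : Char), s.length - i ≤ k → c ≠ '\\' →
      (sppALoop s p2 i (s.drop i) depth false sC false = sppBMain s p2 s.length i depth) ∧
      (sppALoop s p2 i (s.drop i) depth true c false =
        sppBMain s p2 s.length (sppBSkip s s.length c i + 1) depth) ∧
      (sppALoop s p2 i (s.drop i) depth true c true =
        sppBMain s p2 s.length (sppBSkip s s.length c (i+1) + 1) depth) := by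
  intro k
  induction k with
  | zero =>
    intro i depth sC c hk hc
    have hi : s.length ≤ i := by omega
    have hd : s.drop i = [] := List.drop_eq_nil_of_le hi
    have hskip : ∀ j, i ≤ j → sppBSkip s s.length c j = j := by
      intro j hj; rw [sppBSkip]; simp; omega
    refine ⟨?_, ?_, ?_⟩ <;>
      · rw [hd, sppALoop, sppBMain]
        first
        | (simp only [hskip i le_rfl]; rw [sppBMain]; simp; omega)
        | (simp only [hskip (i+1) (by omega)]; rw [sppBMain]; simp; omega)
        | (simp; omega)
  | succ k ih =>
    intro i depth sC c hk hc
    by_cases hi : i < s.length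
    · have hd : s.drop i = s.getD i ' ' :: s.drop (i+1) := by
        rw [List.getD_eq_getElem s ' ' hi]
        exact (List.getElem_cons_drop hi).symm
      set ci := s.getD i ' ' with hci
      refine ⟨?_, ?_, ?_⟩
      · -- normal mode
        rw [hd, sppALoop, sppBMain]
        simp only [dif_pos hi, Bool.false_eq_true, if_false, ← hci]
        by_cases h1 : "([{<".toList.contains ci
        · simp only [h1, if_true]
          exact (ih (i+1) (depth+1) sC c (by omega) hc).1
        · simp only [h1]
          by_cases h2 : (depth == 0 && String.mk [ci] == p2) = true
          · simp [h2]
          · simp only [h2]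
            by_cases h3 : ")]}>".toList.contains ci
            · simp only [h3, if_true]
              exact (ih (i+1) (depth-1) sC c (by omega) hc).1
            · simp only [h3]
              by_cases h4 : "'\"`".toList.contains ci
              · simp only [h4, if_true]
                have hq : ci ≠ '\\' := by
                  intro h; rw [h] at h4; simp at h4
                exact (ih (i+1) depth sC ci (by omega) hq).2.1
              · simp only [h4]
                exact (ih (i+1) depth sC c (by omega) hc).1
      · -- in-string, esc = false
        rw [hd, sppALoop]
        simp only [if_true, Bool.false_eq_true, if_false]
        rw [sppBSkip]
        simp only [dif_pos hi, ← hci]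
        by_cases hb : ci == '\\'
        · have hne : (ci == c) = false := by
            simp at hb ⊢; rw [hb]; exact fun h => hc h.symm
          simp only [hb, if_true, hne, Bool.false_eq_true, if_false]
          exact (ih (i+1) depth c c (by omega) hc).2.2
        · simp only [hb, Bool.false_eq_true, if_false]
          by_cases he : ci == c
          · simp only [he, if_true]
            exact (ih (i+1) depth c c (by omega) hc).1
          · simp only [he, Bool.false_eq_true, if_false]
            exact (ih (i+1) depth c c (by omega) hc).2.1
      · -- in-string, esc = true
        rw [hd, sppALoop]
        simp only [if_true]
        exact (ih (i+1) depth c c (by omega) hc).2.1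
    · -- i ≥ length: same as the base case
      have hd : s.drop i = [] := List.drop_eq_nil_of_le (by omega)
      have hskip : ∀ j, i ≤ j → sppBSkip s s.length c j = j := by
        intro j hj; rw [sppBSkip]; simp; omega
      refine ⟨?_, ?_, ?_⟩ <;>
        · rw [hd, sppALoop, sppBMain]
          first
          | (simp only [hskip i le_rfl]; rw [sppBMain]; simp; omega)
          | (simp only [hskip (i+1) (by omega)]; rw [sppBMain]; simp; omega)
          | (simp; omega)

-- ===== VERDICT (by name: the statement is the Claim_ definition above) =====
theorem separate_paren_prefix_spec : Claim_equal_separate_paren_prefix := by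
  intro sig parens _
  show separate_paren_prefix sig parens = separate_paren_prefix_alt sig parens
  unfold separate_paren_prefix separate_paren_prefix_alt
  by_cases h : PySem.Str.startswith sig parens.1
  · simp only [h, Bool.not_true, Bool.false_eq_true, if_false]
    have := spp_corr (sig.toList.drop 1) parens.2 (sig.toList.drop 1).length 0 0 ' ' '\'' (by omega) (by decide)
    simpa using this.1
  · simp only [Bool.not_eq_true] at h
    simp only [PySem.Str.startswith_eq] at h
    simp [h]
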